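-- pv_equiv track=rewrite | github.com/dasamerica/ct208 | aula_2805_maior_elemento/ct208_maior_menor_elemento_recursivo.py | maior_menor_trocas
-- ===== SOURCE A (Python) =====
-- def maior_menor_trocas (elements):
--   me = elements[0]
--   ma = elements[0]
--   n = 1
--   t= [0,0,0,0]
--   while n < (len(elements)):
--     # conta trocas maior
--     if ma < elements[n]:
--        ma = elements[n]
--        t[0]+=1
--     # conta trocas menor
--     if me > elements [n]:
--        me = elements[n]
--        t[1]+=1
--     n+=1
--   return (t)
-- ===== SOURCE B (Python) =====
-- def maior_menor_trocas(elements):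
--     def running(better):
--         pm = []
--         for x in elements:
--             pm.append(x if not pm or better(x, pm[-1]) else pm[-1])
--         return pm
--     def changes(pm, better):
--         return sum(1 for a, b in zip(pm, pm[1:]) if better(b, a))
--     gt = lambda x, l: x > l
--     lt = lambda x, l: x < l
--     return [changes(running(gt), gt), changes(running(lt), lt), 0, 0]
-- ===== Notes on version B (the rewrite author's own statement) =====
-- stated objective: alternative
-- what changed: Instead of one index-driven while loop mutating two extrema and a counter list, B builds the running-maximum and running-minimum prefix sequences and counts the strictly changing adjacent positions in each.
import Mathlib
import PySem

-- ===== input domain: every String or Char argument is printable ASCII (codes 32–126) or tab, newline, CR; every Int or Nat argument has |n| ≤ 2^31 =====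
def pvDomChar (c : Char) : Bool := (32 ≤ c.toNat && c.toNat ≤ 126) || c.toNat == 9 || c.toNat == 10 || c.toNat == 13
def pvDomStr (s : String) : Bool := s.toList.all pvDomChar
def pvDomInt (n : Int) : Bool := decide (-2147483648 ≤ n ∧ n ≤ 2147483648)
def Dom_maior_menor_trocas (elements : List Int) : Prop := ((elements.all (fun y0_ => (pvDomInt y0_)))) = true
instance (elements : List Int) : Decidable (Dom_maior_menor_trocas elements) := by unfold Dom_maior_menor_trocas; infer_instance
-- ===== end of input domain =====

-- B replaces A's single index-driven while loop (mutating both extrema and a counter list)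
-- by building running-maximum/minimum prefix sequences and counting strict adjacent changes (alternative decomposition, same cost).


-- ===== PORT A =====
-- the while-loop: n scans indices 1.. updating ma/me and the counter list t in place
def pvA_loop (elements : List Int) : Nat → Nat → Int → Int → List Int → List Int
  | 0, _, _, _, t => t   -- fuel exhausted (never happens with fuel = len(elements))
  | fuel + 1, n, me, ma, t =>
    if h : n < elements.length then
      let x := elements[n]
      let p1 : Int × List Int := if ma < x then (x, t.set 0 (t.getD 0 0 + 1)) else (ma, t)
      let p2 : Int × List Int := if me > x then (x, p1.2.set 1 (p1.2.getD 1 0 + 1)) else (me, p1.2)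
      pvA_loop elements fuel (n + 1) p2.1 p1.1 p2.2
    else t

def maior_menor_trocas (elements : List Int) : List Int :=
  match elements with
  | [] => []   -- elements[0] raises IndexError in Python; excluded by Pre_
  | x :: _ => pvA_loop elements elements.length 1 x x [0, 0, 0, 0]

-- ===== PORT B =====
-- running(better): append x if pm empty or better(x, pm[-1]), else repeat pm[-1]
def pvB_step (bet : Int → Int → Bool) (pm : List Int) (x : Int) : List Int :=
  pm ++ [match pm.getLast? with
         | none => x
         | some l => if bet x l then x else l]

def pvB_running (bet : Int → Int → Bool) (elements : List Int) : List Int :=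
  elements.foldl (pvB_step bet) []

-- changes(pm, better): sum(1 for a, b in zip(pm, pm[1:]) if better(b, a))
def pvB_changes (bet : Int → Int → Bool) (pm : List Int) : Int :=
  (((pm.zip (pm.drop 1)).countP (fun p => bet p.2 p.1) : Nat) : Int)

def maior_menor_trocas_alt (elements : List Int) : List Int :=
  [pvB_changes (fun x l => x > l) (pvB_running (fun x l => x > l) elements),
   pvB_changes (fun x l => x < l) (pvB_running (fun x l => x < l) elements),
   0, 0]

-- ===== PRECONDITION & SPEC =====
def Pre_maior_menor_trocas (elements : List Int) : Prop := elements ≠ []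
instance (elements : List Int) : Decidable (Pre_maior_menor_trocas elements) := by unfold Pre_maior_menor_trocas; infer_instance
def pvWitness_maior_menor_trocas : List Int := [3, 1, 4, 1, 5]

def Spec_maior_menor_trocas (elements : List Int) (out : List Int) : Prop := out = maior_menor_trocas_alt elements
instance (elements : List Int) (out : List Int) : Decidable (Spec_maior_menor_trocas elements out) := by unfold Spec_maior_menor_trocas; infer_instance

-- ===== CLAIM (what is proved, stated in full; the proofs are below) =====
def Claim_equal_maior_menor_trocas : Prop := ∀ (elements : List Int), Dom_maior_menor_trocas elements → Pre_maior_menor_trocas elements → Spec_maior_menor_trocas elements (maior_menor_trocas elements)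
-- ===== LEMMAS AND PROOFS =====

-- A's loop as structural recursion over the scanned suffix
def pvFoldA (xs : List Int) (me ma : Int) (t : List Int) : List Int :=
  match xs with
  | [] => t
  | x :: xs =>
    let p1 : Int × List Int := if ma < x then (x, t.set 0 (t.getD 0 0 + 1)) else (ma, t)
    let p2 : Int × List Int := if me > x then (x, p1.2.set 1 (p1.2.getD 1 0 + 1)) else (me, p1.2)
    pvFoldA xs p2.1 p1.1 p2.2

theorem pvA_loop_eq_foldA (elements : List Int) :
    ∀ (fuel n : Nat) (me ma : Int) (t : List Int), elements.length ≤ n + fuel →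
      pvA_loop elements fuel n me ma t = pvFoldA (elements.drop n) me ma t := by
  intro fuel
  induction fuel with
  | zero =>
    intro n me ma t h
    rw [List.drop_eq_nil_of_le (by omega)]
    rfl
  | succ k ih =>
    intro n me ma t h
    by_cases hn : n < elements.length
    · unfold pvA_loop
      rw [dif_pos hn]
      rw [List.drop_eq_getElem_cons hn]
      simp only [pvFoldA]
      exact ih (n + 1) _ _ _ (by omega)
    · unfold pvA_loop
      rw [dif_neg hn]
      rw [List.drop_eq_nil_of_le (by omega)]
      rfl

-- number of strict improvements in a scan starting with current extremum m
def pvCnt (bet : Int → Int → Bool) : Int → List Int → Nat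
  | _, [] => 0
  | m, x :: xs => if bet x m then pvCnt bet x xs + 1 else pvCnt bet m xs

theorem pvFoldA_counts (xs : List Int) :
    ∀ (me ma a b : Int),
      pvFoldA xs me ma [a, b, 0, 0] =
        [a + (pvCnt (fun x l => x > l) ma xs : Int), b + (pvCnt (fun x l => x < l) me xs : Int), 0, 0] := by
  induction xs with
  | nil => intro me ma a b; simp [pvFoldA, pvCnt]
  | cons x xs ih =>
    intro me ma a b
    by_cases h1 : ma < x
    · by_cases h2 : me > x
      · simp [pvFoldA, ih, pvCnt, h1, h2]
        omega
      · simp [pvFoldA, ih, pvCnt, h1, h2]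
        omega
    · by_cases h2 : me > x
      · simp [pvFoldA, ih, pvCnt, h1, h2]
        omega
      · simp [pvFoldA, ih, pvCnt, h1, h2]

-- adjacent strict changes, recursively
def pvAdj (bet : Int → Int → Bool) : List Int → Nat
  | a :: b :: rest => (if bet b a then 1 else 0) + pvAdj bet (b :: rest)
  | _ => 0

theorem pvZip_countP_eq_adj (bet : Int → Int → Bool) :
    ∀ pm : List Int, (pm.zip (pm.drop 1)).countP (fun p => bet p.2 p.1) = pvAdj bet pm := by
  intro pm
  induction pm with
  | nil => simp [pvAdj]
  | cons a tl ih =>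
    cases tl with
    | nil => simp [pvAdj]
    | cons b r =>
      simp only [List.drop_succ_cons, List.drop_zero, List.zip_cons_cons, List.countP_cons]
      rw [show (b :: r).drop 1 = r from rfl] at ih
      simp only [pvAdj]
      rw [ih]
      by_cases hb : bet b a <;> simp [hb] <;> omega

theorem pvAdj_append (bet : Int → Int → Bool) :
    ∀ (pm : List Int) (m y : Int), pm.getLast? = some m →
      pvAdj bet (pm ++ [y]) = pvAdj bet pm + (if bet y m then 1 else 0) := by
  intro pm
  induction pm with
  | nil => intro m y h; simp at h
  | cons a tl ih =>
    intro m y h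
    cases tl with
    | nil =>
      simp at h
      subst h
      simp [pvAdj]
      try omega
    | cons b r =>
      have hlast : (b :: r).getLast? = some m := by
        rw [← h]; simp [List.getLast?_cons_cons]
      have := ih m y hlast
      simp only [List.cons_append, pvAdj] at *
      rw [this]
      omega

theorem pvB_running_adj (bet : Int → Int → Bool) (hirr : ∀ a, bet a a = false) :
    ∀ (xs pm : List Int) (m : Int), pm.getLast? = some m →
      pvAdj bet (xs.foldl (pvB_step bet) pm) = pvAdj bet pm + pvCnt bet m xs := by
  intro xs
  induction xs with
  | nil => intro pm m h; simp [pvCnt]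
  | cons x xs ih =>
    intro pm m h
    have hstep : pvB_step bet pm x = pm ++ [if bet x m then x else m] := by
      simp [pvB_step, h]
    by_cases hx : bet x m
    · have hl : (pm ++ [if bet x m then x else m]).getLast? = some x := by
        simp [hx]
      rw [List.foldl_cons, hstep, ih _ x hl, pvAdj_append bet pm m _ h]
      simp [pvCnt, hx]
      try omega
    · have hl : (pm ++ [if bet x m then x else m]).getLast? = some m := by
        simp [hx]
      rw [List.foldl_cons, hstep, ih _ m hl, pvAdj_append bet pm m _ h]
      simp [pvCnt, hx, hirr]

theorem pvB_changes_running (bet : Int → Int → Bool) (hirr : ∀ a, bet a a = false)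
    (x : Int) (xs : List Int) :
    pvB_changes bet (pvB_running bet (x :: xs)) = (pvCnt bet x xs : Nat) := by
  unfold pvB_changes pvB_running
  rw [pvZip_countP_eq_adj]
  rw [List.foldl_cons]
  have hfirst : pvB_step bet [] x = [x] := by simp [pvB_step]
  rw [hfirst, pvB_running_adj bet hirr xs [x] x (by simp)]
  simp [pvAdj]

-- ===== VERDICT (by name: the statement is the Claim_ definition above) =====
theorem maior_menor_trocas_spec : Claim_equal_maior_menor_trocas := by
  intro elements _ hpre
  unfold Spec_maior_menor_trocas
  match elements with
  | [] => exact absurd rfl hpre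
  | x :: xs =>
    show pvA_loop (x :: xs) (x :: xs).length 1 x x [0, 0, 0, 0] = _
    rw [pvA_loop_eq_foldA (x :: xs) (x :: xs).length 1 x x [0,0,0,0] (by simp)]
    simp only [List.drop_succ_cons, List.drop_zero]
    rw [pvFoldA_counts xs x x 0 0]
    unfold maior_menor_trocas_alt
    rw [pvB_changes_running (fun x l => x > l) (by intro a; simp) x xs]
    rw [pvB_changes_running (fun x l => x < l) (by intro a; simp) x xs]
    simp
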